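-- pv_equiv track=rewrite | github.com/aakashgangji/Leetcode | Mix/MaxBalanceXor.py | maxBalancedSubarray
-- ===== SOURCE A (Python) =====
-- from typing import List
--
-- def maxBalancedSubarray(nums: List[int]) -> int:
--     seen = dict()
--     # State: (xor_sum, even_minus_odd): first_index_seen
--     seen[(0, 0)] = -1  # base case
--     xor_sum = 0
--     even_minus_odd = 0
--     res = 0
--
--     for i, num in enumerate(nums):
--         xor_sum ^= num
--         if num % 2 == 0:
--             even_minus_odd += 1
--         else:
--             even_minus_odd -= 1
--         key = (xor_sum, even_minus_odd)
--         if key in seen: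
--             res = max(res, i - seen[key])
--         else:
--             seen[key] = i
--     return res
-- ===== SOURCE B (Python) =====
-- from typing import List
--
-- def maxBalancedSubarray(nums: List[int]) -> int:
--     res = 0
--     for i in range(len(nums)):
--         x = 0
--         bal = 0
--         length = 0
--         for num in nums[i:]:
--             x ^= num
--             bal += 1 if num % 2 == 0 else -1
--             length += 1
--             if x == 0 and bal == 0:
--                 res = max(res, length)
--     return res
-- ===== Notes on version B (the rewrite author's own statement) =====
-- stated objective: alternative
-- what changed: Replaced the single-pass hashmap of first-seen (xor, even-minus-odd) prefix states with a direct brute-force scan over all subarrays that maintains a running xor and parity balance incrementally for each start index.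
import Mathlib
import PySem

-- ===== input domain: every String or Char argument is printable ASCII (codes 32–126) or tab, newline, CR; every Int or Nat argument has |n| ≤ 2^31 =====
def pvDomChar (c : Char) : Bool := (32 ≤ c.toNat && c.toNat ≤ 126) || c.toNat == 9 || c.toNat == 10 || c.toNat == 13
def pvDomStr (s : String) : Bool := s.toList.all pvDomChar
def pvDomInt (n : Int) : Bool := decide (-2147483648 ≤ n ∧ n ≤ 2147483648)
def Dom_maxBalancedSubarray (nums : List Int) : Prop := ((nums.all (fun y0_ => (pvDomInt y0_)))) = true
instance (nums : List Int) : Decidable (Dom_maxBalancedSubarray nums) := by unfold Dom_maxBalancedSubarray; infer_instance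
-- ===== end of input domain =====

-- B replaces A's single-pass prefix-state hashmap with a direct brute-force scan over all
-- subarrays (alternative decomposition, O(n^2) instead of O(n); not faster, just structurally different).

-- ===== PORT A =====
-- one loop step of A: update xor_sum / even_minus_odd, then look up or insert the key
def pvAStep (st : PySem.Dict (Int × Int) Int × Int × Int × Int) (p : Int × Int) :
    PySem.Dict (Int × Int) Int × Int × Int × Int :=
  let xs := PySem.Int.bxor st.2.1 p.2
  let emo := if PySem.Int.mod p.2 2 = 0 then st.2.2.1 + 1 else st.2.2.1 - 1
  match st.1.get? (xs, emo) with
  | some v => (st.1, xs, emo, max st.2.2.2 (p.1 - v))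
  | none => (st.1.insert (xs, emo) p.1, xs, emo, st.2.2.2)

def maxBalancedSubarray (nums : List Int) : Int :=
  ((PySem.List.enumerate nums 0).foldl pvAStep
    (PySem.Dict.insert PySem.Dict.empty (0, 0) (-1), 0, 0, 0)).2.2.2

-- ===== PORT B =====
-- one inner-loop step of B: update x / bal / length, record the length when both are zero
def pvBInner (st : Int × Int × Int × Int) (num : Int) : Int × Int × Int × Int :=
  let x := PySem.Int.bxor st.1 num
  let bal := if PySem.Int.mod num 2 = 0 then st.2.1 + 1 else st.2.1 - 1
  let len := st.2.2.1 + 1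
  (x, bal, len, if x = 0 ∧ bal = 0 then max st.2.2.2 len else st.2.2.2)

def maxBalancedSubarray_alt (nums : List Int) : Int :=
  (PySem.List.pyRange 0 (nums.length : Int) 1).foldl
    (fun res i => ((PySem.List.slice nums (some i) none).foldl pvBInner (0, 0, 0, res)).2.2.2)
    0

-- ===== PRECONDITION & SPEC =====
def Spec_maxBalancedSubarray (nums : List Int) (out : Int) : Prop := out = maxBalancedSubarray_alt nums
instance (nums : List Int) (out : Int) : Decidable (Spec_maxBalancedSubarray nums out) := by unfold Spec_maxBalancedSubarray; infer_instance

-- ===== CLAIM (what is proved, stated in full; the proofs are below) =====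
def Claim_equal_maxBalancedSubarray : Prop := ∀ (nums : List Int), Dom_maxBalancedSubarray nums → Spec_maxBalancedSubarray nums (maxBalancedSubarray nums)

-- ===== LEMMAS AND PROOFS =====

-- the common prefix-state transition both programs are built on
def pvStep (s : Int × Int) (num : Int) : Int × Int :=
  (PySem.Int.bxor s.1 num, if PySem.Int.mod num 2 = 0 then s.2 + 1 else s.2 - 1)

-- prefix states (0,0) = state before any element, … , state after all n elements
def pvStates (nums : List Int) : List (Int × Int) := List.scanl pvStep (0, 0) nums

def pvS (nums : List Int) (k : Nat) : Int × Int := (pvStates nums).getD k (0, 0)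

-- d is the distance of a repeated prefix state
def pvGood (nums : List Int) (d : Int) : Prop :=
  ∃ p q : Nat, p < q ∧ q ≤ nums.length ∧ pvS nums p = pvS nums q ∧ d = (q : Int) - (p : Int)

-- ---------- bxor is an abelian group operation ----------

theorem pv_rep (a : Int) : ∃ n : Nat, a = (n : Int) ∨ a = -(n : Int) - 1 := by
  rcases le_or_gt 0 a with h | h
  · exact ⟨a.toNat, Or.inl (by omega)⟩
  · exact ⟨(-a - 1).toNat, Or.inr (by omega)⟩

theorem pv_bxor_nn (m n : Nat) : PySem.Int.bxor (m : Int) (n : Int) = ((m ^^^ n : Nat) : Int) :=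
  PySem.Int.bxor_natCast m n

theorem pv_bxor_np (m n : Nat) :
    PySem.Int.bxor (m : Int) (-(n : Int) - 1) = -((m ^^^ n : Nat) : Int) - 1 := by
  have h1 : (0 : Int) ≤ (m : Int) := by omega
  have h2 : ¬ (0 : Int) ≤ -(n : Int) - 1 := by omega
  simp only [PySem.Int.bxor, if_pos h1, if_neg h2]
  have e1 : (-(-(n : Int) - 1) - 1) = (n : Int) := by ring
  rw [e1]
  simp only [Int.toNat_natCast]

theorem pv_bxor_pn (m n : Nat) :
    PySem.Int.bxor (-(m : Int) - 1) (n : Int) = -((m ^^^ n : Nat) : Int) - 1 := by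
  have h1 : ¬ (0 : Int) ≤ -(m : Int) - 1 := by omega
  have h2 : (0 : Int) ≤ (n : Int) := by omega
  simp only [PySem.Int.bxor, if_pos h2, if_neg h1]
  have e1 : (-(-(m : Int) - 1) - 1) = (m : Int) := by ring
  rw [e1]
  simp only [Int.toNat_natCast]

theorem pv_bxor_pp (m n : Nat) :
    PySem.Int.bxor (-(m : Int) - 1) (-(n : Int) - 1) = ((m ^^^ n : Nat) : Int) := by
  have h1 : ¬ (0 : Int) ≤ -(m : Int) - 1 := by omega
  have h2 : ¬ (0 : Int) ≤ -(n : Int) - 1 := by omega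
  simp only [PySem.Int.bxor, if_neg h1, if_neg h2]
  have e1 : (-(-(m : Int) - 1) - 1) = (m : Int) := by ring
  have e2 : (-(-(n : Int) - 1) - 1) = (n : Int) := by ring
  rw [e1, e2]
  simp only [Int.toNat_natCast]

theorem pv_bxor_assoc (a b c : Int) :
    PySem.Int.bxor (PySem.Int.bxor a b) c = PySem.Int.bxor a (PySem.Int.bxor b c) := by
  obtain ⟨x, hx | hx⟩ := pv_rep a <;> obtain ⟨y, hy | hy⟩ := pv_rep b <;>
    obtain ⟨z, hz | hz⟩ := pv_rep c <;> subst hx hy hz <;>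
    simp only [pv_bxor_nn, pv_bxor_np, pv_bxor_pn, pv_bxor_pp, Nat.xor_assoc]

theorem pv_bxor_zero (a : Int) : PySem.Int.bxor a 0 = a := PySem.Int.bxor_zero a

theorem pv_zero_bxor (a : Int) : PySem.Int.bxor 0 a = a := by
  rw [PySem.Int.bxor_comm]; exact pv_bxor_zero a

theorem pv_bxor_cancel {x X : Int} (h : PySem.Int.bxor x X = x) : X = 0 := by
  have : PySem.Int.bxor x (PySem.Int.bxor x X) = PySem.Int.bxor x x := by rw [h]
  rwa [← pv_bxor_assoc, PySem.Int.bxor_self, pv_zero_bxor] at this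

-- ---------- the shift lemma: pvStep folds are translations ----------

theorem pv_foldl_shift (l : List Int) (x b : Int) :
    l.foldl pvStep (x, b) =
      (PySem.Int.bxor x (l.foldl pvStep (0, 0)).1, b + (l.foldl pvStep (0, 0)).2) := by
  induction l generalizing x b with
  | nil => simp
  | cons a l ih =>
    simp only [List.foldl_cons]
    by_cases hc : PySem.Int.mod a 2 = 0 <;>
    · simp only [pvStep, hc, if_true, if_false]
      rw [ih, ih (PySem.Int.bxor 0 a)]
      rw [pv_zero_bxor, pv_bxor_assoc]
      rw [Prod.ext_iff]
      refine ⟨rfl, by ring⟩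

theorem pv_fixed_iff (l : List Int) (s : Int × Int) :
    l.foldl pvStep s = s ↔ l.foldl pvStep (0, 0) = (0, 0) := by
  obtain ⟨x, b⟩ := s
  rw [pv_foldl_shift]
  constructor
  · intro h
    have h1 : PySem.Int.bxor x (l.foldl pvStep (0, 0)).1 = x := congrArg Prod.fst h
    have h2 : b + (l.foldl pvStep (0, 0)).2 = b := congrArg Prod.snd h
    have hX := pv_bxor_cancel h1
    rw [Prod.ext_iff]
    exact ⟨hX, by omega⟩
  · intro h
    rw [h]
    simp

-- ---------- prefix-state characterisations ----------

theorem pv_scanl_getD (f : (Int × Int) → Int → (Int × Int)) (l : List Int) (b : Int × Int)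
    (k : Nat) (hk : k ≤ l.length) :
    (List.scanl f b l).getD k (0, 0) = (l.take k).foldl f b := by
  induction l generalizing b k with
  | nil =>
    have hk0 : k = 0 := by simpa using hk
    subst hk0; simp
  | cons a l ih =>
    cases k with
    | zero => simp
    | succ k => simpa using ih (f b a) k (by simpa using hk)

theorem pv_S_eq (nums : List Int) (k : Nat) (hk : k ≤ nums.length) :
    pvS nums k = (nums.take k).foldl pvStep (0, 0) :=
  pv_scanl_getD pvStep nums (0, 0) k hk

theorem pv_S_succ (nums : List Int) (k : Nat) (hk : k < nums.length) :
    pvS nums (k + 1) = pvStep (pvS nums k) (nums.getD k 0) := by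
  rw [pv_S_eq nums k (le_of_lt hk), pv_S_eq nums (k + 1) hk]
  rw [List.take_succ]
  have h0 : nums[k]? = some (nums.getD k 0) := by
    rw [List.getElem?_eq_getElem hk]
    rw [List.getD_eq_getElem?_getD, List.getElem?_eq_getElem hk]
    rfl
  rw [h0]
  simp

-- good distances equal zero-segment lengths
theorem pv_good_iff (nums : List Int) (d : Int) :
    pvGood nums d ↔ ∃ i L : Nat, 1 ≤ L ∧ i + L ≤ nums.length ∧
      ((nums.drop i).take L).foldl pvStep (0, 0) = (0, 0) ∧ d = (L : Int) := by
  constructor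
  · rintro ⟨p, q, hpq, hqn, hS, rfl⟩
    refine ⟨p, q - p, by omega, by omega, ?_, by omega⟩
    have hseg : nums.take q = nums.take p ++ (nums.drop p).take (q - p) := by
      have hq : q = p + (q - p) := by omega
      rw [hq, List.take_add]
      congr 2
      omega
    have h1 := pv_S_eq nums p (by omega)
    have h2 := pv_S_eq nums q hqn
    rw [hseg, List.foldl_append, ← h1] at h2
    rw [← (pv_fixed_iff _ (pvS nums p))]
    rw [← h2]
    exact hS.symm
  · rintro ⟨i, L, hL, hiL, hz, rfl⟩
    refine ⟨i, i + L, by omega, by omega, ?_, by omega⟩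
    have hseg : nums.take (i + L) = nums.take i ++ (nums.drop i).take L := by
      rw [List.take_add]
    rw [pv_S_eq nums i (by omega), pv_S_eq nums (i + L) (by omega), hseg, List.foldl_append]
    rw [(pv_fixed_iff ((nums.drop i).take L) ((nums.take i).foldl pvStep (0, 0))).mpr hz]

-- ---------- B-side ----------

def pvIR (t u : List Int) (res : Int) : Int :=
  (t.foldl pvBInner ((u.foldl pvStep (0, 0)).1, (u.foldl pvStep (0, 0)).2, (u.length : Int), res)).2.2.2

theorem pv_F_append (u : List Int) (num : Int) :
    (u ++ [num]).foldl pvStep (0, 0) = pvStep (u.foldl pvStep (0, 0)) num := by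
  rw [List.foldl_append]
  rfl

theorem pv_inner_spec : ∀ (t u : List Int) (res : Int),
    res ≤ pvIR t u res ∧
    (pvIR t u res = res ∨ ∃ L : Nat, u.length < L ∧ L ≤ u.length + t.length ∧
      ((u ++ t).take L).foldl pvStep (0, 0) = (0, 0) ∧ pvIR t u res = (L : Int)) ∧
    (∀ L : Nat, u.length < L → L ≤ u.length + t.length →
      ((u ++ t).take L).foldl pvStep (0, 0) = (0, 0) → (L : Int) ≤ pvIR t u res) := by
  intro t
  induction t with
  | nil =>
    intro u res
    refine ⟨le_refl _, Or.inl rfl, ?_⟩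
    intro L h1 h2 _
    exfalso
    simp at h2
    omega
  | cons num t ih =>
    intro u res
    have hw : u ++ num :: t = (u ++ [num]) ++ t := by simp
    have hlen' : (u ++ [num]).length = u.length + 1 := by simp
    have htake : ((u ++ [num]) ++ t).take (u.length + 1) = u ++ [num] := by
      rw [← hlen']
      exact List.take_left
    have hIR : pvIR (num :: t) u res =
        pvIR t (u ++ [num])
          (if (u ++ [num]).foldl pvStep (0, 0) = (0, 0) then max res ((u.length : Int) + 1)
           else res) := by
      unfold pvIR
      rw [show (((u ++ [num]).length : Nat) : Int) = (u.length : Int) + 1 by push_cast [hlen']; ring]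
      rw [pv_F_append]
      simp only [List.foldl_cons, pvBInner, pvStep, Prod.mk.injEq]
    obtain ⟨ih1, ih2, ih3⟩ := ih (u ++ [num])
      (if (u ++ [num]).foldl pvStep (0, 0) = (0, 0) then max res ((u.length : Int) + 1) else res)
    have hres2 : res ≤ (if (u ++ [num]).foldl pvStep (0, 0) = (0, 0)
        then max res ((u.length : Int) + 1) else res) := by
      split
      · exact le_max_left _ _
      · exact le_refl _
    refine ⟨?_, ?_, ?_⟩
    · rw [hIR]
      exact le_trans hres2 ih1
    · rw [hIR]
      rcases ih2 with h | ⟨L, hL1, hL2, hL3, hL4⟩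
      · rw [h]
        by_cases hc : (u ++ [num]).foldl pvStep (0, 0) = (0, 0)
        · rw [if_pos hc]
          rcases max_choice res ((u.length : Int) + 1) with hm | hm
          · rw [hm]
            exact Or.inl rfl
          · rw [hm]
            refine Or.inr ⟨u.length + 1, by omega, by simp, ?_, by push_cast; ring⟩
            rw [hw, htake]
            exact hc
        · rw [if_neg hc]
          exact Or.inl rfl
      · refine Or.inr ⟨L, by omega, by simp at hL2 ⊢; omega, ?_, hL4⟩
        rw [hw]
        exact hL3
    · intro L hL1 hL2 hL3
      rw [hIR]
      by_cases hLeq : L = u.length + 1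
      · subst hLeq
        rw [hw, htake] at hL3
        have : ((u.length : Int) + 1) ≤ (if (u ++ [num]).foldl pvStep (0, 0) = (0, 0)
            then max res ((u.length : Int) + 1) else res) := by
          rw [if_pos hL3]
          exact le_max_right _ _
        push_cast
        exact le_trans this ih1
      · refine ih3 L (by omega) (by simp at hL2 ⊢; omega) ?_
        rw [← hw]
        exact hL3

theorem pv_alt_eq (nums : List Int) :
    maxBalancedSubarray_alt nums =
      (List.range nums.length).foldl
        (fun res k => ((nums.drop k).foldl pvBInner (0, 0, 0, res)).2.2.2) 0 := by
  unfold maxBalancedSubarray_alt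
  rw [PySem.List.pyRange_one, List.foldl_map]
  have h1 : ((nums.length : Int) - 0).toNat = nums.length := by omega
  rw [h1]
  congr 1
  funext res k
  rw [zero_add, PySem.List.slice_from_natCast]

theorem pv_outer (nums : List Int) : ∀ m : Nat, m ≤ nums.length →
    0 ≤ (List.range m).foldl
        (fun res k => ((nums.drop k).foldl pvBInner (0, 0, 0, res)).2.2.2) 0 ∧
    ((List.range m).foldl (fun res k => ((nums.drop k).foldl pvBInner (0, 0, 0, res)).2.2.2) 0 = 0 ∨
      ∃ i L : Nat, i < m ∧ 1 ≤ L ∧ i + L ≤ nums.length ∧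
        ((nums.drop i).take L).foldl pvStep (0, 0) = (0, 0) ∧
        (List.range m).foldl (fun res k => ((nums.drop k).foldl pvBInner (0, 0, 0, res)).2.2.2) 0 = (L : Int)) ∧
    (∀ i L : Nat, i < m → 1 ≤ L → i + L ≤ nums.length →
      ((nums.drop i).take L).foldl pvStep (0, 0) = (0, 0) →
      (L : Int) ≤ (List.range m).foldl (fun res k => ((nums.drop k).foldl pvBInner (0, 0, 0, res)).2.2.2) 0) := by
  intro m
  induction m with
  | zero =>
    intro _
    refine ⟨le_refl _, Or.inl rfl, ?_⟩
    intro i L hi _ _ _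
    omega
  | succ m ih =>
    intro hm
    obtain ⟨ih1, ih2, ih3⟩ := ih (by omega)
    rw [List.range_succ, List.foldl_append, List.foldl_cons, List.foldl_nil]
    set r := (List.range m).foldl
        (fun res k => ((nums.drop k).foldl pvBInner (0, 0, 0, res)).2.2.2) 0 with hr
    have hIR0 : ∀ res : Int, ((nums.drop m).foldl pvBInner (0, 0, 0, res)).2.2.2 =
        pvIR (nums.drop m) [] res := by
      intro res
      rfl
    obtain ⟨s1, s2, s3⟩ := pv_inner_spec (nums.drop m) [] r
    rw [hIR0 r]
    have hlen : (nums.drop m).length = nums.length - m := by simp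
    refine ⟨le_trans ih1 s1, ?_, ?_⟩
    · rcases s2 with h | ⟨L, hL1, hL2, hL3, hL4⟩
      · rw [h]
        rcases ih2 with h' | ⟨i, L, h1, h2, h3, h4, h5⟩
        · exact Or.inl h'
        · exact Or.inr ⟨i, L, by omega, h2, h3, h4, h5⟩
      · refine Or.inr ⟨m, L, by omega, by simpa using hL1, by simp at hL2; omega, ?_, hL4⟩
        simpa using hL3
    · intro i L hi hL hiL hz
      by_cases him : i < m
      · exact le_trans (ih3 i L him hL hiL hz) s1
      · have : i = m := by omega
        subst this
        refine s3 L (by simpa using hL) (by simp; omega) ?_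
        simpa using hz

theorem pv_alt_spec (nums : List Int) :
    0 ≤ maxBalancedSubarray_alt nums ∧
    (maxBalancedSubarray_alt nums = 0 ∨ pvGood nums (maxBalancedSubarray_alt nums)) ∧
    (∀ d, pvGood nums d → d ≤ maxBalancedSubarray_alt nums) := by
  obtain ⟨h1, h2, h3⟩ := pv_outer nums nums.length (le_refl _)
  rw [← pv_alt_eq] at h1 h2 h3
  refine ⟨h1, ?_, ?_⟩
  · rcases h2 with h | ⟨i, L, ha, hb, hc, hd, he⟩
    · exact Or.inl h
    · exact Or.inr ((pv_good_iff nums _).mpr ⟨i, L, hb, hc, hd, he⟩)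
  · intro d hd
    obtain ⟨i, L, ha, hb, hc, hd'⟩ := (pv_good_iff nums d).mp hd
    subst hd'
    exact h3 i L (by omega) ha hb hc

-- ---------- A-side ----------

def pvInv (nums : List Int) (k : Nat) (st : PySem.Dict (Int × Int) Int × Int × Int × Int) : Prop :=
  (st.2.1, st.2.2.1) = pvS nums k ∧
  (∀ s v, st.1.get? s = some v ↔
    ∃ p : Nat, p ≤ k ∧ v = (p : Int) - 1 ∧ pvS nums p = s ∧ ∀ p' < p, pvS nums p' ≠ s) ∧
  0 ≤ st.2.2.2 ∧
  (st.2.2.2 = 0 ∨ ∃ p q : Nat, p < q ∧ q ≤ k ∧ pvS nums p = pvS nums q ∧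
      st.2.2.2 = (q : Int) - (p : Int)) ∧
  (∀ p q : Nat, p < q → q ≤ k → pvS nums p = pvS nums q → (q : Int) - (p : Int) ≤ st.2.2.2)

theorem pv_S_zero (nums : List Int) : pvS nums 0 = (0, 0) := by
  cases nums <;> simp [pvS, pvStates]

theorem pv_inv_init (nums : List Int) :
    pvInv nums 0 (PySem.Dict.insert PySem.Dict.empty (0, 0) (-1), 0, 0, 0) := by
  refine ⟨(pv_S_zero nums).symm, ?_, le_refl _, Or.inl rfl, ?_⟩
  · intro s v
    rw [PySem.Dict.get?_insert]
    by_cases hs : s = ((0, 0) : Int × Int)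
    · rw [if_pos hs]
      constructor
      · intro h
        have hv : v = -1 := by
          injection h with h'
          omega
        exact ⟨0, le_refl _, by omega, by rw [pv_S_zero, hs], by omega⟩
      · rintro ⟨p, hp, hv, _, _⟩
        have : p = 0 := by omega
        subst this
        have : v = -1 := by omega
        rw [this]
    · rw [if_neg hs]
      rw [PySem.Dict.get?_empty]
      constructor
      · intro h
        exact absurd h (by simp)
      · rintro ⟨p, hp, _, hps, _⟩
        have : p = 0 := by omega
        subst this
        rw [pv_S_zero] at hps
        exact absurd hps.symm hs
  · intro p q hpq hq _
    omega

theorem pv_inv_step (nums : List Int) (k : Nat) (hk : k < nums.length) st (h : pvInv nums k st) :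
    pvInv nums (k + 1) (pvAStep st ((k : Int), nums.getD k 0)) := by
  obtain ⟨h1, h2, h3, h4, h5⟩ := h
  set num := nums.getD k 0 with hnum
  have hS1 : pvS nums (k + 1) = pvStep (pvS nums k) num := pv_S_succ nums k hk
  have hfst : st.2.1 = (pvS nums k).1 := by rw [← h1]
  have hsnd : st.2.2.1 = (pvS nums k).2 := by rw [← h1]
  have hkey : (PySem.Int.bxor st.2.1 num,
      if PySem.Int.mod num 2 = 0 then st.2.2.1 + 1 else st.2.2.1 - 1) = pvS nums (k + 1) := by
    rw [hS1]
    simp only [pvStep]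
    rw [hfst, hsnd]
  have hexist : ∀ s : Int × Int, (∃ p : Nat, p ≤ k ∧ pvS nums p = s) →
      ∃ v, st.1.get? s = some v := by
    intro s hs
    have hspec := Nat.find_spec hs
    refine ⟨((Nat.find hs : Nat) : Int) - 1, (h2 s _).mpr ⟨Nat.find hs, hspec.1, rfl, hspec.2, ?_⟩⟩
    intro p' hp' hcontra
    exact Nat.find_min hs hp' ⟨by omega, hcontra⟩
  cases hget : st.1.get? (PySem.Int.bxor st.2.1 num,
      if PySem.Int.mod num 2 = 0 then st.2.2.1 + 1 else st.2.2.1 - 1) with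
  | none =>
    have hnotbefore : ∀ p : Nat, p ≤ k → pvS nums p ≠ pvS nums (k + 1) := by
      intro p hp hcontra
      obtain ⟨v, hv⟩ := hexist (pvS nums (k + 1)) ⟨p, hp, hcontra⟩
      rw [hkey] at hget
      rw [hv] at hget
      exact Option.some_ne_none v hget
    have hred : pvAStep st ((k : Int), num) =
        (st.1.insert (PySem.Int.bxor st.2.1 num,
            if PySem.Int.mod num 2 = 0 then st.2.2.1 + 1 else st.2.2.1 - 1) (k : Int),
          PySem.Int.bxor st.2.1 num,
          (if PySem.Int.mod num 2 = 0 then st.2.2.1 + 1 else st.2.2.1 - 1),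
          st.2.2.2) := by
      simp only [pvAStep, hget]
    rw [hred]
    refine ⟨hkey, ?_, h3, ?_, ?_⟩
    · intro s v'
      rw [PySem.Dict.get?_insert]
      by_cases hcase : s = (PySem.Int.bxor st.2.1 num,
          if PySem.Int.mod num 2 = 0 then st.2.2.1 + 1 else st.2.2.1 - 1)
      · rw [if_pos hcase]
        constructor
        · intro h'
          have hv' : v' = (k : Int) := by
            injection h' with h''
            omega
          refine ⟨k + 1, le_refl _, by push_cast; omega, by rw [hcase, hkey], ?_⟩
          intro p' hp'
          rw [hcase, hkey]
          exact hnotbefore p' (by omega)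
        · rintro ⟨p, hpk, hv', hps, hmin⟩
          have hpk1 : p = k + 1 := by
            by_contra hne
            exact hnotbefore p (by omega) (by rw [hps, hcase, hkey])
          subst hpk1
          have : v' = (k : Int) := by push_cast at hv'; omega
          rw [this]
      · rw [if_neg hcase]
        rw [h2 s v']
        constructor
        · rintro ⟨p, hpk, hv', hps, hmin⟩
          exact ⟨p, by omega, hv', hps, hmin⟩
        · rintro ⟨p, hpk, hv', hps, hmin⟩
          refine ⟨p, ?_, hv', hps, hmin⟩
          by_contra hgt
          have : p = k + 1 := by omega
          subst this
          exact hcase (by rw [← hps, hkey])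
    · rcases h4 with h | ⟨p, q, ha, hb, hc, hd⟩
      · exact Or.inl h
      · exact Or.inr ⟨p, q, ha, by omega, hc, hd⟩
    · intro p q hpq hqk1 hpsq
      by_cases hqk : q ≤ k
      · exact h5 p q hpq hqk hpsq
      · have : q = k + 1 := by omega
        subst this
        exact absurd hpsq (hnotbefore p (by omega))
  | some v =>
    have hred : pvAStep st ((k : Int), num) =
        (st.1, PySem.Int.bxor st.2.1 num,
          (if PySem.Int.mod num 2 = 0 then st.2.2.1 + 1 else st.2.2.1 - 1),
          max st.2.2.2 ((k : Int) - v)) := by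
      simp only [pvAStep, hget]
    rw [hred]
    obtain ⟨p0, hp0k, hv, hp0S, hmin⟩ := (h2 _ v).mp hget
    have hp0S' : pvS nums p0 = pvS nums (k + 1) := by rw [hp0S, hkey]
    refine ⟨hkey, ?_, ?_, ?_, ?_⟩
    · intro s v'
      show st.1.get? s = some v' ↔ _
      rw [h2 s v']
      constructor
      · rintro ⟨p, hpk, hv', hps, hmin'⟩
        exact ⟨p, by omega, hv', hps, hmin'⟩
      · rintro ⟨p, hpk1, hv', hps, hmin'⟩
        by_cases hple : p ≤ k
        · exact ⟨p, hple, hv', hps, hmin'⟩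
        · exfalso
          have : p = k + 1 := by omega
          subst this
          exact hmin' p0 (by omega) (by rw [hp0S', hps])
    · show (0 : Int) ≤ max st.2.2.2 ((k : Int) - v)
      exact le_trans (by omega) (le_max_right st.2.2.2 ((k : Int) - v))
    · show max st.2.2.2 ((k : Int) - v) = 0 ∨ _
      rcases le_total st.2.2.2 ((k : Int) - v) with hle | hle
      · rw [max_eq_right hle]
        exact Or.inr ⟨p0, k + 1, by omega, le_refl _, hp0S', by push_cast; omega⟩
      · rw [max_eq_left hle]
        rcases h4 with h | ⟨p, q, ha, hb, hc, hd⟩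
        · exact Or.inl h
        · exact Or.inr ⟨p, q, ha, by omega, hc, hd⟩
    · intro p q hpq hqk1 hpsq
      show (q : Int) - (p : Int) ≤ max st.2.2.2 ((k : Int) - v)
      have h6 := le_max_right st.2.2.2 ((k : Int) - v)
      have h7 := le_max_left st.2.2.2 ((k : Int) - v)
      by_cases hqk : q ≤ k
      · have := h5 p q hpq hqk hpsq
        omega
      · have hq : q = k + 1 := by omega
        subst hq
        have hp0le : p0 ≤ p := by
          by_contra hlt
          exact hmin p (by omega) (by rw [hpsq, hkey])
        omega

theorem pv_inv_main (nums : List Int) : ∀ (rest : List Int) (k : Nat) st,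
    nums.drop k = rest → k ≤ nums.length → pvInv nums k st →
    pvInv nums nums.length ((PySem.List.enumerate rest (k : Int)).foldl pvAStep st) := by
  intro rest
  induction rest with
  | nil =>
    intro k st hdrop hk hinv
    have : k = nums.length := by
      have := congrArg List.length hdrop
      simp at this
      omega
    simpa [PySem.List.enumerate_nil, this] using hinv
  | cons x rest ih =>
    intro k st hdrop hk hinv
    have hklt : k < nums.length := by
      have := congrArg List.length hdrop
      simp at this
      omega
    have hx : nums.getD k 0 = x := by
      have h0 : nums[k]? = some x := by
        have hgd : (nums.drop k)[0]? = some x := by rw [hdrop]; rfl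
        rw [List.getElem?_drop] at hgd
        simpa using hgd
      rw [List.getD_eq_getElem?_getD, h0]
      rfl
    rw [PySem.List.enumerate_cons, List.foldl_cons]
    have hstep := pv_inv_step nums k hklt st hinv
    rw [hx] at hstep
    have hdrop' : nums.drop (k + 1) = rest := by
      have h1 := congrArg List.tail hdrop
      rw [List.tail_drop] at h1
      exact h1
    have hres := ih (k + 1) (pvAStep st ((k : Int), x)) hdrop' (by omega) hstep
    have hc : ((k : Int) + 1) = (((k + 1 : Nat)) : Int) := by push_cast; ring
    rw [hc]
    exact hres

theorem pv_A_spec (nums : List Int) :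
    0 ≤ maxBalancedSubarray nums ∧
    (maxBalancedSubarray nums = 0 ∨ pvGood nums (maxBalancedSubarray nums)) ∧
    (∀ d, pvGood nums d → d ≤ maxBalancedSubarray nums) := by
  have h := pv_inv_main nums nums 0 _ (by simp) (by simp) (pv_inv_init nums)
  obtain ⟨_, _, h3, h4, h5⟩ := h
  refine ⟨h3, ?_, ?_⟩
  · rcases h4 with h | ⟨p, q, h1, h2, hS, he⟩
    · exact Or.inl h
    · exact Or.inr ⟨p, q, h1, h2, hS, he⟩
  · rintro d ⟨p, q, h1, h2, hS, rfl⟩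
    exact h5 p q h1 h2 hS

-- ===== VERDICT (by name: the statement is the Claim_ definition above) =====
theorem maxBalancedSubarray_spec : Claim_equal_maxBalancedSubarray := by
  intro nums _
  unfold Spec_maxBalancedSubarray
  obtain ⟨ha0, ha1, ha2⟩ := pv_A_spec nums
  obtain ⟨hb0, hb1, hb2⟩ := pv_alt_spec nums
  apply le_antisymm
  · rcases ha1 with h | h
    · omega
    · exact hb2 _ h
  · rcases hb1 with h | h
    · omega
    · exact ha2 _ h
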